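-- pv_equiv track=rewrite | github.com/hs-ryu/TIL | python/알고리즘/pro/lev2_2개이하로다른비트.py | solution
-- ===== SOURCE A (Python) =====
-- def solution(numbers):
--     answer = []
--
--     for num in numbers:
--         if num % 2 == 0:
--             bin_num = list(bin(num)[2:])
--             bin_num[-1] = "1"
--         else:
--             bin_num = bin(num)[2:]
--             bin_num = "0" + bin_num
--             oneidx = bin_num.rfind("0")
--             bin_num = list(bin_num)
--             bin_num[oneidx] = "1"
--             bin_num[oneidx+1] = "0"
--         ans_num = int("".join(bin_num), 2)
--         answer.append(ans_num)
--     return answer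
-- ===== SOURCE B (Python) =====
-- def solution(numbers):
--     answer = []
--     for num in numbers:
--         if num % 2 == 0:
--             # lowest bit of an even number is 0: setting it adds 1
--             answer.append(num + 1)
--         else:
--             # lowest zero bit of num; flip it on and its lower neighbour off
--             lz = (num + 1) & ~num
--             answer.append(num + lz // 2)
--     return answer
-- ===== Notes on version B (the rewrite author's own statement) =====
-- stated objective: simpler
-- what changed: B replaces A's string pipeline (bin(), mutable char list, rfind, int(join,2)) by pure integer bit arithmetic: num+1 for even num, num + ((num+1) & ~num)//2 for odd num.
-- outside the precondition, e.g. on solution([-3]): A returns [11], B returns [-2]; on solution([-1]): A returns [5], B returns [-1]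
import Mathlib
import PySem

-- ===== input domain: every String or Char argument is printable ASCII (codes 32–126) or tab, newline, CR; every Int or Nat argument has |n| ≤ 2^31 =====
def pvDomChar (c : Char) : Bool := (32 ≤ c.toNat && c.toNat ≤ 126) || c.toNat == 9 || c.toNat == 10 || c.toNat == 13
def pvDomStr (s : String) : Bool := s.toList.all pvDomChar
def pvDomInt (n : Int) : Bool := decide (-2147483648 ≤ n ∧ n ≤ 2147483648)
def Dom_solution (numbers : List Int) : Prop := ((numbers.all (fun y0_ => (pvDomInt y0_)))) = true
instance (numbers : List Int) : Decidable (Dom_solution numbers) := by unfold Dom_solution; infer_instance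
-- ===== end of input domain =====

-- B replaces A's bin()/char-list/rfind/int(·,2) string juggling by pure integer bit
-- arithmetic (objective: simpler); return-value equivalence only, no argument is mutated.

-- ===== PORT A =====
def pvDigit (n : Nat) : Char := if n % 2 = 1 then '1' else '0'

-- binary digits of n (MSB first), i.e. bin(n)[2:] for n ≥ 0; the fuel n+1 always
-- suffices (go recurses on n/2), it only makes the recursion structural
def pvBinStrGo : Nat → Nat → List Char
  | 0, _ => []
  | fuel + 1, n => if n < 2 then [pvDigit n] else pvBinStrGo fuel (n / 2) ++ [pvDigit (n % 2)]

def pvBinStr (n : Nat) : List Char := pvBinStrGo (n + 1) n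

-- bin(num)[2:] : for num < 0, bin gives '-0b…', so the slice keeps a leading 'b'
def pvBinSlice (num : Int) : List Char :=
  if num < 0 then 'b' :: pvBinStr (-num).toNat else pvBinStr num.toNat

-- Python list item assignment l[i] = c (negative index counts from the end;
-- the out-of-range IndexError is unreachable in solution)
def pySetChar (l : List Char) (i : Int) (c : Char) : List Char :=
  let j : Int := if i < 0 then i + l.length else i
  l.set j.toNat c

-- s.rfind("0"): index of the last '0', -1 if none
def pvRfind0 : List Char → Int
  | [] => -1
  | c :: t =>
    let r := pvRfind0 t
    if 0 ≤ r then r + 1 else if c = '0' then 0 else -1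

-- int(s, 2): exact wherever Python returns a value (digits 0/1 after an optional
-- '0b' prefix); where Python raises ValueError; the input is excluded by Pre_
def pvParseBin (s : List Char) : Int :=
  let t := if s.take 2 = ['0', 'b'] then s.drop 2 else s
  t.foldl (fun a c => 2 * a + (if c = '1' then 1 else 0)) 0

def pvStep (num : Int) : Int :=
  if PySem.Int.mod num 2 = 0 then
    pvParseBin (pySetChar (pvBinSlice num) (-1) '1')
  else
    let b0 := '0' :: pvBinSlice num
    let oneidx := pvRfind0 b0
    pvParseBin (pySetChar (pySetChar b0 oneidx '1') (oneidx + 1) '0')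

def solution (numbers : List Int) : List Int :=
  numbers.foldl (fun answer num => answer ++ [pvStep num]) []

-- ===== PORT B =====
def pvStepAlt (num : Int) : Int :=
  if PySem.Int.mod num 2 = 0 then num + 1
  else num + PySem.Int.floordiv (Int.land (num + 1) (Int.not num)) 2

def solution_alt (numbers : List Int) : List Int :=
  numbers.foldl (fun answer num => answer ++ [pvStepAlt num]) []

-- ===== PRECONDITION & SPEC =====
-- Pre_ excludes lists with a negative element, on which A's bin(num)[2:] slice keeps a
-- stray 'b': for even negatives int(...,2) then raises ValueError, and for odd negatives
-- A returns a positive number parsed out of that malformed string — a value B could only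
-- match by rebuilding the same broken string (see the cites in claim.json).
def Pre_solution (numbers : List Int) : Prop :=
  ∀ n ∈ numbers, 0 ≤ n
instance (numbers : List Int) : Decidable (Pre_solution numbers) := by
  unfold Pre_solution; infer_instance

def pvWitness_solution : List Int := [2, 5]

def Spec_solution (numbers : List Int) (out : List Int) : Prop :=
  out = solution_alt numbers
instance (numbers : List Int) (out : List Int) : Decidable (Spec_solution numbers out) := by
  unfold Spec_solution; infer_instance

-- ===== CLAIM (what is proved, stated in full; the proofs are below) =====
def Claim_equal_solution : Prop := ∀ (numbers : List Int), Dom_solution numbers → Pre_solution numbers → Spec_solution numbers (solution numbers)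

-- ===== LEMMAS AND PROOFS =====

-- the lowest zero bit of n, as a power of two (2^(number of trailing one bits))
def pvLsp (n : Nat) : Nat :=
  if h : n % 2 = 0 then 1 else 2 * pvLsp (n / 2)
decreasing_by omega

theorem pvBinStrGo_congr (f1 : Nat) : ∀ n f2, n < f1 → n < f2 →
    pvBinStrGo f1 n = pvBinStrGo f2 n := by
  induction f1 with
  | zero => omega
  | succ f1' ih =>
    intro n f2 h1 h2
    cases f2 with
    | zero => omega
    | succ f2' =>
      simp only [pvBinStrGo]
      split
      · rfl
      · rw [ih (n / 2) f2' (by omega) (by omega)]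

theorem pvBinStr_lt_two {n : Nat} (h : n < 2) : pvBinStr n = [pvDigit n] := by
  simp [pvBinStr, pvBinStrGo, h]

theorem pvBinStr_two_le {n : Nat} (h : 2 ≤ n) :
    pvBinStr n = pvBinStr (n / 2) ++ [pvDigit (n % 2)] := by
  show pvBinStrGo (n + 1) n = pvBinStrGo (n / 2 + 1) (n / 2) ++ [pvDigit (n % 2)]
  have h1 : pvBinStrGo (n + 1) n
      = if n < 2 then [pvDigit n] else pvBinStrGo n (n / 2) ++ [pvDigit (n % 2)] := rfl
  rw [h1, if_neg (by omega), pvBinStrGo_congr n (n / 2) (n / 2 + 1) (by omega) (by omega)]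

theorem pvBinStr_chars (n : Nat) : ∀ c ∈ pvBinStr n, c = '0' ∨ c = '1' := by
  induction n using Nat.strong_induction_on with
  | _ n ih =>
    by_cases h : n < 2
    · rw [pvBinStr_lt_two h]
      intro c hc
      simp at hc
      subst hc
      unfold pvDigit; split <;> simp
    · rw [pvBinStr_two_le (by omega)]
      intro c hc
      rcases List.mem_append.mp hc with h1 | h1
      · exact ih (n / 2) (by omega) c h1
      · simp at h1; subst h1; unfold pvDigit; split <;> simp

theorem pvBinStr_len_pos (n : Nat) : 0 < (pvBinStr n).length := by
  by_cases h : n < 2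
  · rw [pvBinStr_lt_two h]; simp
  · rw [pvBinStr_two_le (by omega)]; simp

theorem foldl_bin_binStr (n : Nat) : ∀ a : Int,
    (pvBinStr n).foldl (fun a c => 2 * a + (if c = '1' then 1 else 0)) a
      = a * 2 ^ (pvBinStr n).length + n := by
  induction n using Nat.strong_induction_on with
  | _ n ih =>
    intro a
    by_cases h : n < 2
    · rw [pvBinStr_lt_two h]
      interval_cases n <;> simp [pvDigit] <;> ring
    · rw [pvBinStr_two_le (by omega)]
      rw [List.foldl_append, ih (n / 2) (by omega) a]
      simp only [List.foldl_cons, List.foldl_nil, List.length_append, List.length_cons,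
        List.length_nil]
      have h2 : n % 2 = 0 ∨ n % 2 = 1 := by omega
      rcases h2 with h2 | h2 <;>
        · simp [pvDigit, h2, pow_succ]
          ring_nf
          omega

-- pvParseBin never strips a prefix on a 0/1-only string
theorem pvParseBin_eq_foldl {s : List Char} (h : ∀ c ∈ s, c = '0' ∨ c = '1') :
    pvParseBin s = s.foldl (fun a c => 2 * a + (if c = '1' then 1 else 0)) 0 := by
  unfold pvParseBin
  have : ¬ s.take 2 = ['0', 'b'] := by
    intro he
    have hb : 'b' ∈ s := List.mem_of_mem_take (l := s) (by rw [he]; simp)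
    rcases h 'b' hb with h1 | h1 <;> simp at h1
  simp [this]

theorem pvRfind0_append_one (t : List Char) : pvRfind0 (t ++ ['1']) = pvRfind0 t := by
  induction t with
  | nil => simp [pvRfind0]
  | cons c t ih => simp [pvRfind0, ih]

theorem pvRfind0_append_zero (t : List Char) : pvRfind0 (t ++ ['0']) = (t.length : Int) := by
  induction t with
  | nil => simp [pvRfind0]
  | cons c t ih =>
    simp only [List.cons_append, pvRfind0, ih]
    simp

theorem pvRfind0_lt_length (s : List Char) : pvRfind0 s < (s.length : Int) := by
  induction s with
  | nil => simp [pvRfind0]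
  | cons c t ih =>
    simp only [pvRfind0, List.length_cons]
    split
    · push_cast; omega
    · split <;> push_cast <;> omega

theorem pvRfind0_nonneg {s : List Char} (h : '0' ∈ s) : 0 ≤ pvRfind0 s := by
  induction s with
  | nil => simp at h
  | cons c t ih =>
    by_cases h0 : (0 : Int) ≤ pvRfind0 t
    · simp only [pvRfind0]; rw [if_pos h0]; omega
    · rcases List.mem_cons.mp h with h1 | h1
      · simp only [pvRfind0]; rw [if_neg h0, if_pos h1.symm]
      · exact absurd (ih h1) h0

-- odd m: the binary string ends with '1'
theorem pvBinStr_odd_ends (m : Nat) (h : m % 2 = 1) :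
    ∃ u, pvBinStr m = u ++ ['1'] ∧ (∀ c ∈ u, c = '0' ∨ c = '1') := by
  by_cases h2 : m < 2
  · refine ⟨[], ?_, by simp⟩
    have : m = 1 := by omega
    subst this
    simp [pvBinStr_lt_two, pvDigit]
  · refine ⟨pvBinStr (m / 2), ?_, pvBinStr_chars _⟩
    rw [pvBinStr_two_le (by omega), h]
    rfl

theorem pvLsp_odd {n : Nat} (h : n % 2 = 1) : pvLsp n = 2 * pvLsp (n / 2) := by
  rw [pvLsp]; simp [h]

theorem pvLsp_even {n : Nat} (h : n % 2 = 0) : pvLsp n = 1 := by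
  rw [pvLsp]; simp [h]

-- proof-only abbreviation for A's odd-branch double assignment
def pvModif (s : List Char) : List Char :=
  pySetChar (pySetChar s (pvRfind0 s) '1') (pvRfind0 s + 1) '0'

theorem pvModif_chars {s : List Char} (h : ∀ c ∈ s, c = '0' ∨ c = '1') :
    ∀ c ∈ pvModif s, c = '0' ∨ c = '1' := by
  intro c hc
  unfold pvModif pySetChar at hc
  rcases List.mem_or_eq_of_mem_set hc with hc1 | hc1
  · rcases List.mem_or_eq_of_mem_set hc1 with hc2 | hc2
    · exact h c hc2
    · right; exact hc2
  · left; exact hc1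

theorem pvModif_pos {s : List Char} (hj : 0 ≤ pvRfind0 s) :
    pvModif s = (s.set (pvRfind0 s).toNat '1').set ((pvRfind0 s).toNat + 1) '0' := by
  simp only [pvModif, pySetChar]
  rw [if_neg (by omega), if_neg (by omega),
    show (pvRfind0 s + 1).toNat = (pvRfind0 s).toNat + 1 by omega]

-- ===== the central A-side lemma: value of the modified string for odd n =====
theorem oddA_core (n : Nat) (hodd : n % 2 = 1) :
    (pvModif ('0' :: pvBinStr n)).foldl (fun a c => 2 * a + (if c = '1' then 1 else 0)) 0
      = (n : Int) + ((pvLsp n / 2 : Nat) : Int) := by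
  induction n using Nat.strong_induction_on with
  | _ n ih =>
    by_cases h4 : n % 4 = 1
    · -- lowest zero bit is bit 1: the result is n + 1
      have hlsp : pvLsp n = 2 := by
        rw [pvLsp_odd hodd, pvLsp_even (show n / 2 % 2 = 0 by omega)]
      by_cases h1 : n = 1
      · subst h1
        rw [hlsp]
        decide
      · -- n = 4q + 1 with q ≥ 1
        have hn5 : 5 ≤ n := by omega
        set q := n / 4 with hq
        have hbn : pvBinStr n = (pvBinStr q ++ ['0']) ++ ['1'] := by
          rw [pvBinStr_two_le (by omega), pvBinStr_two_le (show 2 ≤ n / 2 by omega)]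
          rw [show n / 2 / 2 = q by omega, show n / 2 % 2 = 0 by omega, hodd]
          rfl
        have hs : ('0' :: pvBinStr n) = (('0' :: pvBinStr q) ++ ['0']) ++ ['1'] := by
          rw [hbn]; simp
        have hjv : pvRfind0 ('0' :: pvBinStr n) = (( '0' :: pvBinStr q).length : Int) := by
          rw [hs, pvRfind0_append_one, pvRfind0_append_zero]
        have hmod : pvModif ('0' :: pvBinStr n) = ('0' :: pvBinStr q) ++ ['1', '0'] := by
          rw [pvModif_pos (by rw [hjv]; positivity), hjv, hs]
          rw [Int.toNat_natCast]
          rw [show (('0' :: pvBinStr q) ++ ['0']) ++ ['1']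
                = ('0' :: pvBinStr q) ++ ['0', '1'] by simp]
          rw [List.set_append, if_neg (by simp)]
          rw [show ('0' :: pvBinStr q).length - ('0' :: pvBinStr q).length = 0 by omega]
          rw [show (['0', '1'].set 0 '1') = ['1', '1'] from rfl]
          rw [List.set_append, if_neg (by simp)]
          rw [show ('0' :: pvBinStr q).length + 1 - ('0' :: pvBinStr q).length = 1 by omega]
          rfl
        rw [hmod, hlsp]
        rw [show ('0' :: pvBinStr q) ++ ['1', '0'] = '0' :: (pvBinStr q ++ ['1', '0']) by simp]
        simp only [List.foldl_cons]
        rw [show (2 * (0 : Int) + if ('0' : Char) = '1' then 1 else 0) = 0 by decide]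
        rw [List.foldl_append, foldl_bin_binStr]
        simp only [List.foldl_cons, List.foldl_nil, zero_mul, zero_add]
        have hnq : n = 4 * q + 1 := by omega
        push_cast
        omega
    · -- n % 4 = 3: recurse on m = n / 2
      have h43 : n % 4 = 3 := by omega
      set m := n / 2 with hm
      have hmodd : m % 2 = 1 := by omega
      have hbn : pvBinStr n = pvBinStr m ++ ['1'] := by
        rw [pvBinStr_two_le (by omega), hodd]
        rfl
      have hs : ('0' :: pvBinStr n) = ('0' :: pvBinStr m) ++ ['1'] := by
        rw [hbn]; simp
      set sm := '0' :: pvBinStr m with hsm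
      have hj0 : 0 ≤ pvRfind0 sm := pvRfind0_nonneg (by simp [hsm])
      have hjlt : pvRfind0 sm < (sm.length : Int) - 1 := by
        obtain ⟨u, hu, _⟩ := pvBinStr_odd_ends m hmodd
        have hsmu : sm = ('0' :: u) ++ ['1'] := by rw [hsm, hu]; simp
        have hlt := pvRfind0_lt_length ('0' :: u)
        have hcu : ((('0' :: u).length : Nat) : Int) = (u.length : Int) + 1 := by
          simp
        have hlen2 : ((sm.length : Nat) : Int) = (u.length : Int) + 2 := by
          rw [hsmu]; simp; omega
        rw [show pvRfind0 sm = pvRfind0 ('0' :: u) by rw [hsmu, pvRfind0_append_one]]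
        omega
      set j := (pvRfind0 sm).toNat with hjdef
      have hjlen : j + 1 < sm.length := by omega
      have hjn : pvRfind0 ('0' :: pvBinStr n) = pvRfind0 sm := by
        rw [hs, pvRfind0_append_one]
      have hmod : pvModif ('0' :: pvBinStr n) = pvModif sm ++ ['1'] := by
        rw [pvModif_pos (by rw [hjn]; exact hj0), pvModif_pos hj0, hjn, hs]
        rw [List.set_append, if_pos (by omega), List.set_append,
          if_pos (by simpa using hjlen)]
      rw [hmod, List.foldl_append, ih m (by omega) hmodd]
      simp only [List.foldl_cons, List.foldl_nil]
      have h1 : pvLsp n = 2 * pvLsp m := pvLsp_odd hodd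
      have h2 : pvLsp m = 2 * pvLsp (m / 2) := pvLsp_odd hmodd
      have h3 : n = 2 * m + 1 := by omega
      push_cast
      omega

theorem oddA_value (n : Nat) (hodd : n % 2 = 1) :
    pvParseBin (pySetChar (pySetChar ('0' :: pvBinStr n)
        (pvRfind0 ('0' :: pvBinStr n)) '1') (pvRfind0 ('0' :: pvBinStr n) + 1) '0')
      = (n : Int) + ((pvLsp n / 2 : Nat) : Int) := by
  have hch : ∀ c ∈ ('0' :: pvBinStr n), c = '0' ∨ c = '1' := by
    intro c hc
    rcases List.mem_cons.mp hc with h1 | h1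
    · left; exact h1
    · exact pvBinStr_chars n c h1
  show pvParseBin (pvModif ('0' :: pvBinStr n)) = _
  rw [pvParseBin_eq_foldl (pvModif_chars hch)]
  exact oddA_core n hodd

theorem even_value (n : Nat) (he : n % 2 = 0) :
    pvParseBin (pySetChar (pvBinStr n) (-1) '1') = (n : Int) + 1 := by
  have hl := pvBinStr_len_pos n
  have hset : pySetChar (pvBinStr n) (-1) '1'
      = (pvBinStr n).set ((pvBinStr n).length - 1) '1' := by
    simp only [pySetChar]
    rw [if_pos (by norm_num)]
    congr 1
    omega
  have hch : ∀ c ∈ (pvBinStr n).set ((pvBinStr n).length - 1) '1', c = '0' ∨ c = '1' := by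
    intro c hc
    rcases List.mem_or_eq_of_mem_set hc with h1 | h1
    · exact pvBinStr_chars n c h1
    · right; exact h1
  rw [hset, pvParseBin_eq_foldl hch]
  by_cases h2 : n < 2
  · have : n = 0 := by omega
    subst this
    decide
  · rw [pvBinStr_two_le (by omega), he]
    simp only [List.length_append, List.length_cons, List.length_nil,
      Nat.add_sub_cancel]
    rw [List.set_append, if_neg (by simp)]
    simp only [Nat.sub_self, pvDigit]
    norm_num
    rw [foldl_bin_binStr, zero_mul, zero_add]
    omega

-- ===== B-side: Nat.ldiff (n+1) n is the lowest zero bit =====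
theorem ldiff_succ_self (n : Nat) : Nat.ldiff (n + 1) n = pvLsp n := by
  induction n using Nat.strong_induction_on with
  | _ n ih =>
    apply Nat.eq_of_testBit_eq
    intro i
    by_cases h : n % 2 = 0
    · rw [pvLsp_even h]
      cases i with
      | zero =>
        rw [Nat.testBit_ldiff, Nat.testBit_zero, Nat.testBit_zero, Nat.testBit_zero]
        simp [show (n + 1) % 2 = 1 by omega, show ¬ n % 2 = 1 by omega]
      | succ i =>
        rw [Nat.testBit_ldiff, Nat.testBit_succ, Nat.testBit_succ, Nat.testBit_succ]
        have : (n + 1) / 2 = n / 2 := by omega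
        rw [this]
        simp
    · rw [pvLsp_odd (by omega)]
      cases i with
      | zero =>
        rw [Nat.testBit_ldiff, Nat.testBit_zero, Nat.testBit_zero, Nat.testBit_zero]
        simp [show ¬ (n + 1) % 2 = 1 by omega]
      | succ i =>
        rw [Nat.testBit_ldiff, Nat.testBit_succ, Nat.testBit_succ, Nat.testBit_succ]
        have h1 : (n + 1) / 2 = n / 2 + 1 := by omega
        have h2 : 2 * pvLsp (n / 2) / 2 = pvLsp (n / 2) := by omega
        rw [h1, h2, ← Nat.testBit_ldiff, ih (n / 2) (by omega)]

theorem pvStepAlt_odd (n : Nat) (hodd : n % 2 = 1) :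
    pvStepAlt (n : Int) = ((n : Int) + (pvLsp n / 2 : Nat)) := by
  have hmod : PySem.Int.mod (n : Int) 2 = ((n % 2 : Nat) : Int) := by
    rw [PySem.Int.mod_eq_emod_of_pos (by norm_num)]
    omega
  unfold pvStepAlt
  rw [hmod, hodd]
  simp only [Nat.cast_one, show (1 : Int) ≠ 0 by norm_num, if_false]
  have hnot : Int.not (n : Int) = Int.negSucc n := rfl
  have hland : Int.land ((n : Int) + 1) (Int.not (n : Int)) = ((Nat.ldiff (n + 1) n : Nat) : Int) := by
    rw [hnot]
    rw [show ((n : Int) + 1) = ((n + 1 : Nat) : Int) by push_cast; ring]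
    rfl
  rw [hland, ldiff_succ_self, PySem.Int.floordiv_eq_ediv_of_pos (by norm_num)]
  omega

-- per-element agreement on non-negative inputs
theorem step_eq {num : Int} (h : 0 ≤ num) : pvStep num = pvStepAlt num := by
  obtain ⟨n, rfl⟩ := Int.eq_ofNat_of_zero_le h
  have hmod : PySem.Int.mod (n : Int) 2 = ((n % 2 : Nat) : Int) := by
    rw [PySem.Int.mod_eq_emod_of_pos (by norm_num)]
    omega
  have hslice : pvBinSlice (n : Int) = pvBinStr n := by
    simp [pvBinSlice, show ¬ ((n : Int) < 0) by omega]
  by_cases he : n % 2 = 0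
  · unfold pvStep pvStepAlt
    rw [hmod, he]
    simp only [Nat.cast_zero, reduceIte]
    rw [hslice]
    exact even_value n he
  · have ho : n % 2 = 1 := by omega
    rw [pvStepAlt_odd n ho]
    unfold pvStep
    rw [hmod, ho]
    rw [if_neg (by norm_num)]
    rw [hslice]
    exact oddA_value n ho

theorem foldl_append_map {α β : Type} (g : α → β) (l : List α) : ∀ acc : List β,
    l.foldl (fun a x => a ++ [g x]) acc = acc ++ l.map g := by
  induction l with
  | nil => simp
  | cons x t ih => intro acc; simp [ih]

theorem solution_eq_map (l : List Int) : solution l = l.map pvStep :=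
  foldl_append_map pvStep l []

theorem solution_alt_eq_map (l : List Int) : solution_alt l = l.map pvStepAlt :=
  foldl_append_map pvStepAlt l []

-- ===== VERDICT (by name: the statement is the Claim_ definition above) =====
theorem solution_spec : Claim_equal_solution := by
  intro numbers _ hpre
  show solution numbers = solution_alt numbers
  rw [solution_eq_map, solution_alt_eq_map]
  apply List.map_inj_left.mpr
  intro n hn
  exact step_eq (hpre n hn)
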